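-- pv_equiv track=rewrite | github.com/MitraLab-Organization/bap-ontology-editor | scripts/generate_wiki.py | generate_hierarchy_page
-- ===== SOURCE A (Python) =====
-- from typing import Dict, List, Optional, Set, Tuple
-- from collections import defaultdict
--
-- def generate_hierarchy_page(structures: Dict[str, dict]) -> str:
--     """Generate hierarchy visualization page."""
--
--     # Build children map
--     children = defaultdict(list)
--     for struct_id, struct in structures.items():
--         parent = struct.get('parent')
--         children[parent].append(struct_id)
--
--     # Sort children by name
--     for parent in children:
--         children[parent].sort(key=lambda x: structures[x].get('name', x))
--
--     def generate_tree(node_id: Optional[str], level: int = 0, max_level: int = 8) -> str: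
--         if level > max_level:
--             return ""
--
--         lines = []
--         struct = structures.get(node_id, {}) if node_id else {}
--         name = struct.get('name', node_id) if node_id else 'ROOT'
--
--         indent = "  " * level
--         if level == 0:
--             lines.append(f"{name}")
--         else:
--             lines.append(f"{indent}- **{name}** (`{node_id}`)")
--
--         # Add children
--         child_ids = children.get(node_id, [])
--         for child_id in child_ids[:50]:  # Limit children for readability
--             lines.append(generate_tree(child_id, level + 1, max_level))
--
--         if len(child_ids) > 50:
--             lines.append(f"{indent}  - *...and {len(child_ids) - 50} more*")
--
--         return '\n'.join(lines)
--
--     md = f"""# Hierarchy Explorer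
--
-- This page shows the complete ontological hierarchy of all structures.
--
-- ## Full Hierarchy Tree
--
-- """
--
--     # Generate tree for each root
--     root_ids = children.get(None, [])
--     for root_id in root_ids:
--         md += generate_tree(root_id) + "\n\n"
--
--     md += """
--
-- ## Hierarchy Statistics
--
-- """
--
--     # Calculate some interesting stats
--     leaf_nodes = [s for s in structures.keys() if s not in children or not children[s]]
--     branch_nodes = [s for s in structures.keys() if s in children and children[s]]
--
--     md += f"- **Leaf nodes** (no children): {len(leaf_nodes)}\n"
--     md += f"- **Branch nodes** (has children): {len(branch_nodes)}\n"
--     md += f"- **Root nodes**: {len(root_ids)}\n"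
--
--     md += "\n\n---\n*Auto-generated hierarchy*\n"
--     return md
-- ===== SOURCE B (Python) =====
-- def generate_hierarchy_page(structures):
--     """Generate hierarchy visualization page (iterative, stack-based tree rendering)."""
--
--     # Build children map (same grouping and ordering as the original)
--     children = {}
--     for struct_id, struct in structures.items():
--         children.setdefault(struct.get('parent'), []).append(struct_id)
--     for parent in children:
--         children[parent].sort(key=lambda x: structures[x].get('name', x))
--
--     def tree_lines(root):
--         """Pre-order lines of the tree rooted at `root`, via an explicit LIFO stack."""
--         lines = []
--         stack = [(root, 0)]  # entries: (node_id, level) or a ready-made text line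
--         while stack:
--             entry = stack.pop()
--             if isinstance(entry, str):
--                 lines.append(entry)
--                 continue
--             node_id, level = entry
--             if level > 8:
--                 lines.append("")
--                 continue
--             name = (structures.get(node_id, {}).get('name', node_id)
--                     if node_id else 'ROOT')
--             indent = "  " * level
--             lines.append(name if level == 0
--                          else f"{indent}- **{name}** (`{node_id}`)")
--             kids = children.get(node_id, [])
--             if len(kids) > 50:
--                 stack.append(f"{indent}  - *...and {len(kids) - 50} more*")
--             for child in reversed(kids[:50]):
--                 stack.append((child, level + 1))
--         return lines
--
--     roots = children.get(None, [])
--     body = "".join("\n".join(tree_lines(r)) + "\n\n" for r in roots)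
--
--     n_branch = len([s for s in structures if s in children])
--     n_leaf = len(structures) - n_branch
--
--     return ("# Hierarchy Explorer\n\n"
--             "This page shows the complete ontological hierarchy of all structures.\n\n"
--             "## Full Hierarchy Tree\n\n"
--             + body
--             + "\n\n## Hierarchy Statistics\n\n"
--             + f"- **Leaf nodes** (no children): {n_leaf}\n"
--             + f"- **Branch nodes** (has children): {n_branch}\n"
--             + f"- **Root nodes**: {len(roots)}\n"
--             + "\n\n---\n*Auto-generated hierarchy*\n")
-- ===== Notes on version B (the rewrite author's own statement) =====
-- stated objective: alternative
-- what changed: The recursive generate_tree (which builds nested '\n'-joined strings per subtree) is replaced by an explicit LIFO-stack pre-order loop that collects all tree lines into one flat list joined once per root, and the leaf count is derived arithmetically as len(structures) minus the branch count instead of a second filtering pass; children-map construction and sorting are kept as in A.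
import Mathlib
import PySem

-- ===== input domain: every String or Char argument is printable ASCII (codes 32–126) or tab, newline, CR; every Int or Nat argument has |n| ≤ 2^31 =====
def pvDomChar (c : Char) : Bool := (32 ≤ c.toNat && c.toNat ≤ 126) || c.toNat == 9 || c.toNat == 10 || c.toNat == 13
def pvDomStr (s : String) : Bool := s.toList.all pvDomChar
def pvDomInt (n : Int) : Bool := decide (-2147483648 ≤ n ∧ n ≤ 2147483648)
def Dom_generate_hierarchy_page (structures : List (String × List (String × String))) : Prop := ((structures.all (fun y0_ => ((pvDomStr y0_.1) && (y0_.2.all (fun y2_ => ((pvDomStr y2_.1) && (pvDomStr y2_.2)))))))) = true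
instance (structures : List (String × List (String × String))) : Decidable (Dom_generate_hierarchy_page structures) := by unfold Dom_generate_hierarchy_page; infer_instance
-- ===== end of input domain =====

-- B replaces A's recursive tree rendering by an explicit LIFO-stack loop that collects all
-- lines and joins once, and derives the leaf count arithmetically from the branch count
-- (objective: alternative decomposition; children-map construction and sorting kept as in A).

-- shared input conversion: the Python callee receives a dict of dicts (duplicate keys collapse, last value wins)
def pvToDict (structures : List (String × List (String × String))) :
    PySem.Dict String (PySem.Dict String String) :=
  PySem.Dict.ofList (structures.map (fun p => (p.1, PySem.Dict.ofList p.2)))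

-- sort key: structures[x].get('name', x)  (x is always a key of the dict, so getD is exact)
def pvNameKey (sd : PySem.Dict String (PySem.Dict String String)) (x : String) : String :=
  (sd.getD x PySem.Dict.empty).getD "name" x

-- children-map construction and per-parent sort (identical in A and B, per the source)
def pvChildren (sd : PySem.Dict String (PySem.Dict String String)) :
    PySem.Dict (Option String) (List String) :=
  let ch := sd.items.foldl
    (fun ch p => ch.modify (p.2.get? "parent") [] (fun l => l ++ [p.1])) PySem.Dict.empty
  ch.keys.foldl (fun c parent => c.modify parent [] (fun l => PySem.List.sorted l (pvNameKey sd))) ch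

-- ===== PORT A =====
-- generate_tree: recursion on the level budget (max_level = 8); `if node_id` is `nodeId ≠ ""`
def pvGenTreeA (sd : PySem.Dict String (PySem.Dict String String))
    (ch : PySem.Dict (Option String) (List String)) (nodeId : String) (level : Nat) : String :=
  if _h : level > 8 then ""
  else
    let name := if nodeId ≠ "" then (sd.getD nodeId PySem.Dict.empty).getD "name" nodeId else "ROOT"
    let indent := String.ofList (PySem.List.pyRepeat "  ".toList (level : Int))
    let first := if level == 0 then name else indent ++ "- **" ++ name ++ "** (`" ++ nodeId ++ "`)"
    let childIds := ch.getD (some nodeId) []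
    let lines := first :: (PySem.List.slice childIds none (some 50)).map
      (fun c => pvGenTreeA sd ch c (level + 1))
    let lines := if childIds.length > 50 then
        lines ++ [indent ++ "  - *...and " ++ PySem.Int.toStr ((childIds.length : Int) - 50) ++ " more*"]
      else lines
    PySem.Str.join "\n" lines
termination_by 9 - level
decreasing_by omega

def generate_hierarchy_page (structures : List (String × List (String × String))) : String :=
  let sd := pvToDict structures
  let ch := pvChildren sd
  let header := "# Hierarchy Explorer\n\nThis page shows the complete ontological hierarchy of all structures.\n\n## Full Hierarchy Tree\n\n"
  let rootIds := ch.getD none []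
  let md := rootIds.foldl (fun md r => md ++ pvGenTreeA sd ch r 0 ++ "\n\n") header
  let md := md ++ "\n\n## Hierarchy Statistics\n\n"
  let leafNodes := sd.keys.filter
    (fun s => !(ch.contains (some s)) || decide (ch.getD (some s) [] = []))
  let branchNodes := sd.keys.filter
    (fun s => ch.contains (some s) && !decide (ch.getD (some s) [] = []))
  md ++ "- **Leaf nodes** (no children): " ++ PySem.Int.toStr (leafNodes.length : Int) ++ "\n"
     ++ "- **Branch nodes** (has children): " ++ PySem.Int.toStr (branchNodes.length : Int) ++ "\n"
     ++ "- **Root nodes**: " ++ PySem.Int.toStr (rootIds.length : Int) ++ "\n"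
     ++ "\n\n---\n*Auto-generated hierarchy*\n"

-- ===== PORT B =====
-- the stack is modelled top-at-head (Python's list end = top); `fuel` only makes the
-- while-loop structurally total — 52 ^ 10 bounds the number of iterations (proved below)
def pvTreeLoop (sd : PySem.Dict String (PySem.Dict String String))
    (ch : PySem.Dict (Option String) (List String)) :
    Nat → List (String ⊕ String × Nat) → List String → List String
  | 0, _, lines => lines
  | _ + 1, [], lines => lines
  | fuel + 1, Sum.inl text :: rest, lines => pvTreeLoop sd ch fuel rest (lines ++ [text])
  | fuel + 1, Sum.inr (nodeId, level) :: rest, lines =>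
    if level > 8 then pvTreeLoop sd ch fuel rest (lines ++ [""])
    else
      let name := if nodeId ≠ "" then (sd.getD nodeId PySem.Dict.empty).getD "name" nodeId else "ROOT"
      let indent := String.ofList (PySem.List.pyRepeat "  ".toList (level : Int))
      let line := if level == 0 then name else indent ++ "- **" ++ name ++ "** (`" ++ nodeId ++ "`)"
      let kids := ch.getD (some nodeId) []
      let pushed := if kids.length > 50 then
          [Sum.inl (indent ++ "  - *...and " ++ PySem.Int.toStr ((kids.length : Int) - 50) ++ " more*")]
        else []
      pvTreeLoop sd ch fuel
        ((PySem.List.slice kids none (some 50)).map (fun c => Sum.inr (c, level + 1)) ++ pushed ++ rest)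
        (lines ++ [line])

def pvTreeLines (sd : PySem.Dict String (PySem.Dict String String))
    (ch : PySem.Dict (Option String) (List String)) (root : String) : List String :=
  pvTreeLoop sd ch (52 ^ 10) [Sum.inr (root, 0)] []

def generate_hierarchy_page_alt (structures : List (String × List (String × String))) : String :=
  let sd := pvToDict structures
  let ch := pvChildren sd
  let roots := ch.getD none []
  let body := PySem.Str.join ""
    (roots.map (fun r => PySem.Str.join "\n" (pvTreeLines sd ch r) ++ "\n\n"))
  let nBranch := (sd.keys.filter (fun s => ch.contains (some s))).length
  let nLeaf : Int := (sd.size : Int) - (nBranch : Int)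
  "# Hierarchy Explorer\n\nThis page shows the complete ontological hierarchy of all structures.\n\n## Full Hierarchy Tree\n\n"
    ++ body
    ++ "\n\n## Hierarchy Statistics\n\n"
    ++ "- **Leaf nodes** (no children): " ++ PySem.Int.toStr nLeaf ++ "\n"
    ++ "- **Branch nodes** (has children): " ++ PySem.Int.toStr (nBranch : Int) ++ "\n"
    ++ "- **Root nodes**: " ++ PySem.Int.toStr (roots.length : Int) ++ "\n"
    ++ "\n\n---\n*Auto-generated hierarchy*\n"

-- ===== PRECONDITION & SPEC =====
def Spec_generate_hierarchy_page (structures : List (String × List (String × String))) (out : String) : Prop := out = generate_hierarchy_page_alt structures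
instance (structures : List (String × List (String × String))) (out : String) : Decidable (Spec_generate_hierarchy_page structures out) := by unfold Spec_generate_hierarchy_page; infer_instance

-- ===== CLAIM (what is proved, stated in full; the proofs are below) =====
def Claim_equal_generate_hierarchy_page : Prop := ∀ (structures : List (String × List (String × String))), Dom_generate_hierarchy_page structures → Spec_generate_hierarchy_page structures (generate_hierarchy_page structures)

-- ===== LEMMAS AND PROOFS =====

-- the pre-order line list both renderings produce (proof-only)
def pvEmit (sd : PySem.Dict String (PySem.Dict String String))
    (ch : PySem.Dict (Option String) (List String)) (nodeId : String) (level : Nat) : List String :=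
  if _h : level > 8 then [""]
  else
    let name := if nodeId ≠ "" then (sd.getD nodeId PySem.Dict.empty).getD "name" nodeId else "ROOT"
    let indent := String.ofList (PySem.List.pyRepeat "  ".toList (level : Int))
    let first := if level == 0 then name else indent ++ "- **" ++ name ++ "** (`" ++ nodeId ++ "`)"
    let kids := ch.getD (some nodeId) []
    let more := if kids.length > 50 then
        [indent ++ "  - *...and " ++ PySem.Int.toStr ((kids.length : Int) - 50) ++ " more*"]
      else []
    first :: ((kids.take 50).flatMap (fun c => pvEmit sd ch c (level + 1)) ++ more)
termination_by 9 - level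
decreasing_by omega

lemma pvEmit_ne_nil (sd ch) (nodeId : String) (level : Nat) : pvEmit sd ch nodeId level ≠ [] := by
  rw [pvEmit]; split <;> simp

lemma jc (sep x : List Char) (t : List (List Char)) :
    PySem.Chars.join sep (x :: t) = x ++ (if t = [] then [] else sep ++ PySem.Chars.join sep t) := by
  cases t <;> simp [PySem.Chars.join_singleton, PySem.Chars.join_cons_cons]

lemma japp (sep : List Char) (a b : List (List Char)) (hb : b ≠ []) :
    PySem.Chars.join sep (a ++ b)
      = PySem.Chars.join sep a ++ (if a = [] then [] else sep) ++ PySem.Chars.join sep b := by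
  induction a with
  | nil => simp
  | cons x a ih =>
    rw [List.cons_append, jc, jc]
    have hab : a ++ b ≠ [] := by simp [hb]
    by_cases ha : a = []
    · subst ha; simp [hb]
    · simp [ha, hab, ih, List.append_assoc]

lemma jflat (sep : List Char) (ps : List (List (List Char))) (h : ∀ p ∈ ps, p ≠ []) :
    PySem.Chars.join sep (ps.map (PySem.Chars.join sep)) = PySem.Chars.join sep ps.flatten := by
  induction ps with
  | nil => simp
  | cons p ps ih =>
    have hp : p ≠ [] := h p (by simp)
    have ih' := ih (fun q hq => h q (by simp [hq]))
    rw [List.map_cons, jc, List.flatten_cons]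
    by_cases hps : ps = []
    · subst hps; simp [PySem.Chars.join_nil]
    · have hfl : ps.flatten ≠ [] := by
        cases ps with
        | nil => exact absurd rfl hps
        | cons q qs =>
          have : q ≠ [] := h q (by simp)
          simp [List.flatten_cons]
          intro h1; exact absurd h1 this
      rw [japp sep p ps.flatten hfl]
      simp [hps, hp, ih', List.append_assoc]

lemma jline (sep x : List Char) (t : List (List Char)) (qs : List (List (List Char)))
    (h : ∀ q ∈ qs, q ≠ []) :
    PySem.Chars.join sep (x :: qs.map (PySem.Chars.join sep) ++ t)
      = PySem.Chars.join sep (x :: qs.flatten ++ t) := by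
  cases qs with
  | nil => simp
  | cons q qs' =>
    have hq : q ≠ [] := h q (by simp)
    have h1 : (q :: qs').map (PySem.Chars.join sep) ++ t ≠ [] := by simp
    have h2 : (q :: qs').flatten ++ t ≠ [] := by
      simp only [List.flatten_cons, List.append_assoc, ne_eq, List.append_eq_nil_iff]
      intro h'; exact hq h'.1
    rw [List.cons_append, List.cons_append, jc, jc, if_neg h1, if_neg h2]
    by_cases ht : t = []
    · subst ht
      simp only [List.append_nil]
      rw [jflat sep (q :: qs') h]
    · rw [japp sep _ t ht, japp sep _ t ht, jflat sep (q :: qs') h]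
      simp [hq]

lemma join_line (a : String) (ps : List (List String)) (tail : List String)
    (h : ∀ p ∈ ps, p ≠ []) :
    PySem.Str.join "\n" (a :: ps.map (PySem.Str.join "\n") ++ tail)
      = PySem.Str.join "\n" (a :: ps.flatten ++ tail) := by
  apply String.toList_inj.mp
  have h' : ∀ q ∈ ps.map (List.map String.toList), q ≠ [] := by
    intro q hq
    rcases List.mem_map.mp hq with ⟨p, hp, rfl⟩
    simpa using h p hp
  have hj := jline "\n".toList a.toList (tail.map String.toList) (ps.map (List.map String.toList)) h'
  simp only [PySem.Str.toList_join, List.map_cons, List.map_append, List.map_map,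
    Function.comp_def, List.map_flatten] at hj ⊢
  exact hj

lemma join_line0 (a : String) (ps : List (List String)) (h : ∀ p ∈ ps, p ≠ []) :
    PySem.Str.join "\n" (a :: ps.map (PySem.Str.join "\n"))
      = PySem.Str.join "\n" (a :: ps.flatten) := by
  have := join_line a ps [] h
  simpa using this

lemma genTreeA_emit (sd ch) : ∀ n level nodeId, 9 ≤ level + n →
    pvGenTreeA sd ch nodeId level = PySem.Str.join "\n" (pvEmit sd ch nodeId level) := by
  intro n
  induction n with
  | zero =>
    intro level nodeId hn
    rw [pvGenTreeA, pvEmit, dif_pos (by omega), dif_pos (by omega)]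
    decide
  | succ n ih =>
    intro level nodeId hn
    rw [pvGenTreeA, pvEmit]
    by_cases hl : level > 8
    · rw [dif_pos hl, dif_pos hl]; decide
    · rw [dif_neg hl, dif_neg hl]
      simp only
      rw [PySem.List.slice_to _ (by norm_num : (0:Int) ≤ 50)]
      have htn : ((50 : Int)).toNat = 50 := rfl
      rw [htn]
      set kids := (ch.getD (some nodeId) []) with hk
      have hmap : (kids.take 50).map (fun c => pvGenTreeA sd ch c (level + 1))
          = ((kids.take 50).map (fun c => pvEmit sd ch c (level + 1))).map (PySem.Str.join "\n") := by
        rw [List.map_map]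
        exact List.map_congr_left (fun c _ => ih (level + 1) c (by omega))
      have hflat : (kids.take 50).flatMap (fun c => pvEmit sd ch c (level + 1))
          = ((kids.take 50).map (fun c => pvEmit sd ch c (level + 1))).flatten := by
        simp [List.flatMap_def]
      have hne : ∀ p ∈ (kids.take 50).map (fun c => pvEmit sd ch c (level + 1)), p ≠ [] := by
        intro p hp
        rcases List.mem_map.mp hp with ⟨c, _, rfl⟩
        exact pvEmit_ne_nil sd ch c (level + 1)
      rw [hmap, hflat]
      by_cases hc : kids.length > 50
      · rw [if_pos hc, if_pos hc]
        simp only [← List.cons_append]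
        exact join_line _ _ _ hne
      · rw [if_neg hc, if_neg hc]
        simp only [List.append_nil]
        exact join_line0 _ _ hne

def pvEntryEmit (sd : PySem.Dict String (PySem.Dict String String))
    (ch : PySem.Dict (Option String) (List String)) : (String ⊕ String × Nat) → List String
  | .inl s => [s]
  | .inr (n, l) => pvEmit sd ch n l

def pvWeight : (String ⊕ String × Nat) → Nat
  | .inl _ => 1
  | .inr (_, l) => 52 ^ (10 - l)

lemma pvWeight_pos (e : String ⊕ String × Nat) : 1 ≤ pvWeight e := by
  cases e with
  | inl s => simp [pvWeight]
  | inr p => exact Nat.one_le_pow _ _ (by norm_num)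

lemma loop_spec (sd ch) : ∀ fuel stack lines, (stack.map pvWeight).sum ≤ fuel →
    pvTreeLoop sd ch fuel stack lines = lines ++ stack.flatMap (pvEntryEmit sd ch) := by
  intro fuel
  induction fuel with
  | zero =>
    intro stack lines h
    cases stack with
    | nil => simp [pvTreeLoop]
    | cons e rest =>
      exfalso
      have hw := pvWeight_pos e
      simp only [List.map_cons, List.sum_cons] at h
      omega
  | succ fuel ih =>
    intro stack lines h
    cases stack with
    | nil => simp [pvTreeLoop]
    | cons e rest =>
      simp only [List.map_cons, List.sum_cons] at h
      cases e with
      | inl text =>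
        rw [pvTreeLoop, ih rest _ (by simp [pvWeight] at h; omega)]
        simp [pvEntryEmit]
      | inr p =>
        obtain ⟨nodeId, level⟩ := p
        rw [pvTreeLoop]
        by_cases hl : level > 8
        · rw [if_pos hl, ih rest _ (by have := pvWeight_pos (Sum.inr (nodeId, level)); omega)]
          have he : pvEntryEmit sd ch (Sum.inr (nodeId, level)) = [""] := by
            simp only [pvEntryEmit]; rw [pvEmit, dif_pos hl]
          simp [he]
        · rw [if_neg hl]
          simp only
          rw [PySem.List.slice_to _ (by norm_num : (0:Int) ≤ 50), show ((50:Int)).toNat = 50 from rfl]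
          set kids := ch.getD (some nodeId) [] with hk
          set a := 52 ^ (9 - level) with hadef
          have ha : 1 ≤ a := Nat.one_le_pow _ _ (by norm_num)
          have hsplit : pvWeight (Sum.inr (nodeId, level)) = 52 * a := by
            simp only [pvWeight, hadef]
            rw [show 10 - level = (9 - level) + 1 from by omega, pow_succ]
            ring
          have hexp : 10 - (level + 1) = 9 - level := by omega
          have hw1 : (((kids.take 50).map (fun c => (Sum.inr (c, level + 1) : String ⊕ String × Nat))).map pvWeight).sum
              = (kids.take 50).length * a := by
            rw [List.map_map]
            have : (pvWeight ∘ fun c => (Sum.inr (c, level + 1) : String ⊕ String × Nat)) = fun _ => a := by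
              funext c; simp only [Function.comp_def, pvWeight, hexp, hadef]
            rw [this]
            exact PySem.List.sum_map_const_nat _ _
          have hlen : (kids.take 50).length ≤ 50 := by
            simpa using List.length_take_le 50 kids
          have hwp : ∀ (pushed : List (String ⊕ String × Nat)), (pushed.map pvWeight).sum ≤ 1 →
              ((((kids.take 50).map (fun c => (Sum.inr (c, level + 1) : String ⊕ String × Nat))) ++ pushed ++ rest).map pvWeight).sum ≤ fuel := by
            intro pushed hps
            simp only [List.map_append, List.sum_append, hw1]
            have hmul : (kids.take 50).length * a ≤ 50 * a := Nat.mul_le_mul_right a hlen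
            rw [hsplit] at h
            omega
          by_cases hc : kids.length > 50
          · rw [if_pos hc, ih _ _ (hwp _ (by simp [pvWeight]))]
            simp only [List.flatMap_cons, pvEntryEmit]
            rw [pvEmit, dif_neg hl]
            simp only [← hk, if_pos hc]
            simp [List.flatMap_append, List.flatMap_map, pvEntryEmit, List.append_assoc, ← List.map_take, Function.comp_def]
          · rw [if_neg hc, ih _ _ (hwp _ (by simp))]
            simp only [List.flatMap_cons, pvEntryEmit]
            rw [pvEmit, dif_neg hl]
            simp only [← hk, if_neg hc]
            simp [List.flatMap_append, List.flatMap_map, pvEntryEmit, List.append_assoc, ← List.map_take, Function.comp_def]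

lemma treeLines_emit (sd ch) (root : String) :
    pvTreeLines sd ch root = pvEmit sd ch root 0 := by
  have := loop_spec sd ch (52 ^ 10) [Sum.inr (root, 0)] [] (by simp [pvWeight])
  simpa [pvTreeLines, pvEntryEmit] using this

lemma build_inv : ∀ (items : List (String × PySem.Dict String String))
    (d : PySem.Dict (Option String) (List String)),
    (∀ k, d.contains k → d.getD k [] ≠ []) →
    ∀ k, (items.foldl (fun ch p => ch.modify (p.2.get? "parent") [] (fun l => l ++ [p.1])) d).contains k →
      (items.foldl (fun ch p => ch.modify (p.2.get? "parent") [] (fun l => l ++ [p.1])) d).getD k [] ≠ [] := by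
  intro items
  induction items with
  | nil => intro d hd; simpa using hd
  | cons p items ih =>
    intro d hd
    simp only [List.foldl_cons]
    apply ih
    intro k hk
    rw [PySem.Dict.getD_modify]
    by_cases he : k = p.2.get? "parent"
    · rw [if_pos he]; simp
    · rw [if_neg he]
      apply hd
      rw [PySem.Dict.contains_modify] at hk
      simpa [he] using hk

lemma sort_inv (sd : PySem.Dict String (PySem.Dict String String)) :
    ∀ (ks : List (Option String)) (d : PySem.Dict (Option String) (List String)),
    (∀ k, d.contains k → d.getD k [] ≠ []) → (∀ p ∈ ks, d.contains p) →
    ∀ k, (ks.foldl (fun c parent => c.modify parent [] (fun l => PySem.List.sorted l (pvNameKey sd))) d).contains k →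
      (ks.foldl (fun c parent => c.modify parent [] (fun l => PySem.List.sorted l (pvNameKey sd))) d).getD k [] ≠ [] := by
  intro ks
  induction ks with
  | nil => intro d hd _; simpa using hd
  | cons q ks ih =>
    intro d hd hks
    simp only [List.foldl_cons]
    apply ih
    · intro k hk
      rw [PySem.Dict.getD_modify]
      by_cases he : k = q
      · rw [if_pos he]
        rw [ne_eq, PySem.List.sorted_eq_nil_iff]
        exact hd q (hks q (by simp))
      · rw [if_neg he]
        apply hd
        rw [PySem.Dict.contains_modify] at hk
        simpa [he] using hk
    · intro p hp
      rw [PySem.Dict.contains_modify]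
      simp [hks p (by simp [hp])]

lemma children_val_ne_nil (sd : PySem.Dict String (PySem.Dict String String)) :
    ∀ k, (pvChildren sd).contains k → (pvChildren sd).getD k [] ≠ [] := by
  have hbase : ∀ k, (PySem.Dict.empty : PySem.Dict (Option String) (List String)).contains k →
      (PySem.Dict.empty : PySem.Dict (Option String) (List String)).getD k [] ≠ [] := by
    intro k hk
    simp [PySem.Dict.contains_empty] at hk
  have h1 := build_inv sd.items PySem.Dict.empty hbase
  unfold pvChildren
  simp only
  apply sort_inv
  · exact h1
  · intro p hp
    exact (PySem.Dict.contains_iff_mem_keys _ _).mpr hp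

lemma sjoin_nil_cons (x : String) (t : List String) :
    PySem.Str.join "" (x :: t) = x ++ PySem.Str.join "" t := by
  apply String.toList_inj.mp
  rw [PySem.Str.toList_join, String.toList_append, PySem.Str.toList_join, List.map_cons, jc]
  by_cases ht : t = []
  · subst ht; simp
  · simp [ht]

lemma fold_body (f : String → String) : ∀ (roots : List String) (acc : String),
    roots.foldl (fun md r => md ++ f r ++ "\n\n") acc
      = acc ++ PySem.Str.join "" (roots.map (fun r => f r ++ "\n\n")) := by
  intro roots
  induction roots with
  | nil =>
    intro acc
    have : PySem.Str.join "" ([] : List String) = "" := rfl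
    simp [this]
  | cons r roots ih =>
    intro acc
    rw [List.foldl_cons, ih, List.map_cons, sjoin_nil_cons]
    simp [String.append_assoc]

-- ===== VERDICT (by name: the statement is the Claim_ definition above) =====
theorem generate_hierarchy_page_spec : Claim_equal_generate_hierarchy_page := by
  intro structures _
  unfold Spec_generate_hierarchy_page
  simp only [generate_hierarchy_page, generate_hierarchy_page_alt]
  set sd := pvToDict structures with hsd
  set ch := pvChildren sd with hch0
  have htree : ∀ r : String, pvGenTreeA sd ch r 0 = PySem.Str.join "\n" (pvTreeLines sd ch r) := by
    intro r
    rw [treeLines_emit]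
    exact genTreeA_emit sd ch 9 0 r (by omega)
  rw [fold_body (f := fun r => pvGenTreeA sd ch r 0)]
  rw [List.map_congr_left (fun r _ => by rw [htree r] :
    ∀ r ∈ ch.getD none [], pvGenTreeA sd ch r 0 ++ "\n\n"
      = PySem.Str.join "\n" (pvTreeLines sd ch r) ++ "\n\n")]
  have hchv := children_val_ne_nil sd
  rw [← hch0] at hchv
  have hleaf : sd.keys.filter (fun s => !(ch.contains (some s)) || decide (ch.getD (some s) [] = []))
      = sd.keys.filter (fun s => !(ch.contains (some s))) := by
    apply List.filter_congr
    intro s _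
    by_cases hc : ch.contains (some s)
    · have := hchv (some s) hc
      simp [hc, this]
    · have hc' : ch.contains (some s) = false := by simpa using hc
      have := PySem.Dict.getD_of_not_contains ch ([] : List String) hc'
      simp [hc', this]
  have hbranch : sd.keys.filter (fun s => ch.contains (some s) && !decide (ch.getD (some s) [] = []))
      = sd.keys.filter (fun s => ch.contains (some s)) := by
    apply List.filter_congr
    intro s _
    by_cases hc : ch.contains (some s)
    · have := hchv (some s) hc
      simp [hc, this]
    · have hc' : ch.contains (some s) = false := by simpa using hc
      simp [hc']
  rw [hleaf, hbranch]
  have hn : ((sd.keys.filter (fun s => !(ch.contains (some s)))).length : Int)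
      = (sd.size : Int) - (((sd.keys.filter (fun s => ch.contains (some s))).length : Int)) := by
    have hlen := (List.length_eq_length_filter_add (l := sd.keys) (fun s => ch.contains (some s)))
    have hsz : sd.size = sd.keys.length := by
      simp [PySem.Dict.size, PySem.Dict.keys]
    rw [hsz]
    omega
  rw [hn]
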